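-- pv_equiv track=rewrite | github.com/kesju/ZIVE_2023 | DUOMENU_TVARKYMAS/mit_bih_util.py | get_symbol_list
-- ===== SOURCE A (Python) =====
-- def get_symbol_list(atr_symbols, atr_samples, seq_start, seq_end):
--     # Surenkame išpjautos EKG sekos anotacijas ir jų indeksus sekoje
--     # ir patalpiname sąraše.
--     beat_locs = []
--     beat_symbols = []
--
--     for i in range(len(atr_samples)):
--         if atr_samples[i] > seq_start and atr_samples[i] < seq_end:
--             beat_symbols.append(atr_symbols[i])
--             beat_locs.append(atr_samples[i]-seq_start)
--             # beat_locs.append(atr_samples[i])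
--
--     return (beat_symbols,beat_locs)
-- ===== SOURCE B (Python) =====
-- def get_symbol_list(atr_symbols, atr_samples, seq_start, seq_end):
--     # Divide-and-conquer: split the index range in half, solve each half
--     # independently, concatenate the halves. Correct because the collected
--     # (symbol, location) output is ordered left-to-right over indices, so
--     # the answer for [lo, hi) is the answer for [lo, mid) followed by the
--     # answer for [mid, hi).
--     def rec(lo, hi):
--         if hi - lo <= 0:
--             return ([], [])
--         if hi - lo == 1:
--             v = atr_samples[lo]
--             if seq_start < v < seq_end:
--                 return ([atr_symbols[lo]], [v - seq_start])
--             return ([], [])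
--         mid = (lo + hi) // 2
--         ls, ll = rec(lo, mid)
--         rs, rl = rec(mid, hi)
--         return (ls + rs, ll + rl)
--     return rec(0, len(atr_samples))
-- ===== Notes on version B (the rewrite author's own statement) =====
-- stated objective: alternative
-- what changed: Replaced A's single left-to-right index loop with two parallel appends by a divide-and-conquer recursion that splits the index range in half, solves each half independently and concatenates the results.
import Mathlib
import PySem

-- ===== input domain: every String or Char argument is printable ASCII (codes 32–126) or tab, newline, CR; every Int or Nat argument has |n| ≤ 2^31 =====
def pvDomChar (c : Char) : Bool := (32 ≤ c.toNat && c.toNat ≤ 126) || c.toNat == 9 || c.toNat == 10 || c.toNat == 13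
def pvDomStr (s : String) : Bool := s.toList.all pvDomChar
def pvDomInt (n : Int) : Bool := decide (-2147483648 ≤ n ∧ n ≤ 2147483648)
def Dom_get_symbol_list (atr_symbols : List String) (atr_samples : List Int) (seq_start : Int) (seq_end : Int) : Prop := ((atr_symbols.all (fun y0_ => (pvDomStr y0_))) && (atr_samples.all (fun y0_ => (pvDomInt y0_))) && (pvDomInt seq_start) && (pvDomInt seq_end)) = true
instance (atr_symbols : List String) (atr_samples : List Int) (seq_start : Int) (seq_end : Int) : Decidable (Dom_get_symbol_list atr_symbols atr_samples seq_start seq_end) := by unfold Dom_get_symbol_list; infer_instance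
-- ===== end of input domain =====

-- B replaces A's left-to-right index loop (two parallel appends) by a
-- divide-and-conquer recursion over the index range; objective: alternative.


-- ===== PORT A =====
-- literal port of A: for i in range(len(atr_samples)): if seq_start < atr_samples[i] < seq_end:
--   beat_symbols.append(atr_symbols[i]); beat_locs.append(atr_samples[i]-seq_start)
-- state = (beat_locs, beat_symbols) in declaration order; the pyGetD defaults are
-- never used on inputs satisfying Pre_ (every index read is in range there).
def get_symbol_list (atr_symbols : List String) (atr_samples : List Int) (seq_start : Int) (seq_end : Int) : List String × List Int :=
  let r := (PySem.List.pyRange 0 (PySem.List.len atr_samples) 1).foldl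
    (fun (acc : List Int × List String) i =>
      if seq_start < PySem.List.pyGetD atr_samples i 0 ∧ PySem.List.pyGetD atr_samples i 0 < seq_end then
        (acc.1 ++ [PySem.List.pyGetD atr_samples i 0 - seq_start],
         acc.2 ++ [PySem.List.pyGetD atr_symbols i ""])
      else acc) ([], [])
  (r.2, r.1)

-- ===== PORT B =====
-- B's inner rec(lo, hi): indices are nonnegative throughout (lo starts at 0,
-- hi at len), so they are carried as Nat; '(lo+hi)//2' on nonnegative ints is
-- exactly Nat division. Element reads are the same pyGetD as in A's port
-- (default never used under Pre_, where both Pythons return).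
def pvRecB (atr_symbols : List String) (atr_samples : List Int) (seq_start seq_end : Int) (lo hi : Nat) : List String × List Int :=
  if hi ≤ lo then ([], [])
  else if hi - lo = 1 then
    let v := PySem.List.pyGetD atr_samples (lo : Int) 0
    if seq_start < v ∧ v < seq_end then
      ([PySem.List.pyGetD atr_symbols (lo : Int) ""], [v - seq_start])
    else ([], [])
  else
    let mid := (lo + hi) / 2
    let l := pvRecB atr_symbols atr_samples seq_start seq_end lo mid
    let r := pvRecB atr_symbols atr_samples seq_start seq_end mid hi
    (l.1 ++ r.1, l.2 ++ r.2)
termination_by hi - lo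
decreasing_by all_goals omega

def get_symbol_list_alt (atr_symbols : List String) (atr_samples : List Int) (seq_start : Int) (seq_end : Int) : List String × List Int :=
  pvRecB atr_symbols atr_samples seq_start seq_end 0 atr_samples.length

-- ===== PRECONDITION & SPEC =====
-- Pre_ excludes exactly the inputs on which both Pythons raise IndexError: a
-- sample strictly inside (seq_start, seq_end) at an index with no corresponding
-- symbol (both A and B read atr_symbols[i] there).
def Pre_get_symbol_list (atr_symbols : List String) (atr_samples : List Int) (seq_start : Int) (seq_end : Int) : Prop :=
  ∀ i : Nat, i < atr_samples.length →
    (seq_start < atr_samples.getD i 0 ∧ atr_samples.getD i 0 < seq_end) → i < atr_symbols.length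
instance (atr_symbols : List String) (atr_samples : List Int) (seq_start : Int) (seq_end : Int) : Decidable (Pre_get_symbol_list atr_symbols atr_samples seq_start seq_end) := by unfold Pre_get_symbol_list; infer_instance
def pvWitness_get_symbol_list : List String × List Int × Int × Int := (["N", "V"], [3, 500], 0, 10)

def Spec_get_symbol_list (atr_symbols : List String) (atr_samples : List Int) (seq_start : Int) (seq_end : Int) (out : List String × List Int) : Prop := out = get_symbol_list_alt atr_symbols atr_samples seq_start seq_end
instance (atr_symbols : List String) (atr_samples : List Int) (seq_start : Int) (seq_end : Int) (out : List String × List Int) : Decidable (Spec_get_symbol_list atr_symbols atr_samples seq_start seq_end out) := by unfold Spec_get_symbol_list; infer_instance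

-- ===== CLAIM (what is proved, stated in full; the proofs are below) =====
def Claim_equal_get_symbol_list : Prop := ∀ (atr_symbols : List String) (atr_samples : List Int) (seq_start : Int) (seq_end : Int), Dom_get_symbol_list atr_symbols atr_samples seq_start seq_end → Pre_get_symbol_list atr_symbols atr_samples seq_start seq_end → Spec_get_symbol_list atr_symbols atr_samples seq_start seq_end (get_symbol_list atr_symbols atr_samples seq_start seq_end)

-- ===== LEMMAS AND PROOFS =====

-- per-index contributions: common reference both ports are reduced to
def pvSymAt (atr_symbols : List String) (atr_samples : List Int) (s e : Int) (i : Nat) : List String :=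
  if s < PySem.List.pyGetD atr_samples (i : Int) 0 ∧ PySem.List.pyGetD atr_samples (i : Int) 0 < e
  then [PySem.List.pyGetD atr_symbols (i : Int) ""] else []

def pvLocAt (atr_samples : List Int) (s e : Int) (i : Nat) : List Int :=
  if s < PySem.List.pyGetD atr_samples (i : Int) 0 ∧ PySem.List.pyGetD atr_samples (i : Int) 0 < e
  then [PySem.List.pyGetD atr_samples (i : Int) 0 - s] else []

lemma pv_foldl_pair {ι : Type} (xs : List ι) (f : ι → List Int) (g : ι → List String) :
    ∀ (l1 : List Int) (l2 : List String),
    xs.foldl (fun acc i => (acc.1 ++ f i, acc.2 ++ g i)) (l1, l2)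
      = (l1 ++ xs.flatMap f, l2 ++ xs.flatMap g) := by
  induction xs with
  | nil => intro l1 l2; simp
  | cons x t ih => intro l1 l2; simp [ih]

lemma pv_recB_eq (syms : List String) (samples : List Int) (s e : Int) :
    ∀ (lo hi : Nat),
    pvRecB syms samples s e lo hi
      = ((List.range' lo (hi - lo)).flatMap (pvSymAt syms samples s e),
         (List.range' lo (hi - lo)).flatMap (pvLocAt samples s e)) := by
  intro lo hi
  fun_induction pvRecB syms samples s e lo hi with
  | case1 lo hi h =>
    have h0 : hi - lo = 0 := by omega
    simp [h0]
  | case2 lo hi h h1 v hc =>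
    simp only [v, PySem.List.pyGetD_natCast, List.getD_eq_getElem?_getD] at hc
    simp [h1, pvSymAt, pvLocAt, hc.1, hc.2, v]
  | case3 lo hi h h1 v hc =>
    simp only [v, PySem.List.pyGetD_natCast, List.getD_eq_getElem?_getD] at hc
    simp [h1, pvSymAt, pvLocAt, hc]
  | case4 lo hi h h1 mid l r ihl ihr =>
    have hsplit : List.range' lo (hi - lo)
        = List.range' lo ((lo + hi) / 2 - lo) ++ List.range' ((lo + hi) / 2) (hi - (lo + hi) / 2) := by
      have h2 := List.range'_append_1 (s := lo) (m := (lo + hi) / 2 - lo) (n := hi - (lo + hi) / 2)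
      rw [show lo + ((lo + hi) / 2 - lo) = (lo + hi) / 2 by omega] at h2
      rw [show (lo + hi) / 2 - lo + (hi - (lo + hi) / 2) = hi - lo by omega] at h2
      exact h2.symm
    simp only [hsplit, List.flatMap_append]
    rw [Prod.ext_iff] at ihl ihr ⊢
    exact ⟨by rw [ihl.1, ihr.1], by rw [ihl.2, ihr.2]⟩

-- ===== VERDICT (by name: the statement is the Claim_ definition above) =====
theorem get_symbol_list_spec : Claim_equal_get_symbol_list := by
  intro syms samples s e _ _
  unfold Spec_get_symbol_list get_symbol_list get_symbol_list_alt
  have hfun : (fun (acc : List Int × List String) i =>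
      if s < PySem.List.pyGetD samples i 0 ∧ PySem.List.pyGetD samples i 0 < e then
        (acc.1 ++ [PySem.List.pyGetD samples i 0 - s],
         acc.2 ++ [PySem.List.pyGetD syms i ""])
      else acc)
      = (fun (acc : List Int × List String) i =>
        (acc.1 ++ (if s < PySem.List.pyGetD samples i 0 ∧ PySem.List.pyGetD samples i 0 < e
                   then [PySem.List.pyGetD samples i 0 - s] else []),
         acc.2 ++ (if s < PySem.List.pyGetD samples i 0 ∧ PySem.List.pyGetD samples i 0 < e
                   then [PySem.List.pyGetD syms i ""] else []))) := by
    funext acc i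
    split_ifs with h <;> simp
  have hsym : (fun i : Nat =>
      if s < PySem.List.pyGetD samples ((i : Nat) : Int) 0 ∧ PySem.List.pyGetD samples ((i : Nat) : Int) 0 < e
      then [PySem.List.pyGetD syms ((i : Nat) : Int) ""] else []) = pvSymAt syms samples s e := by
    funext i; simp [pvSymAt]
  have hloc : (fun i : Nat =>
      if s < PySem.List.pyGetD samples ((i : Nat) : Int) 0 ∧ PySem.List.pyGetD samples ((i : Nat) : Int) 0 < e
      then [PySem.List.pyGetD samples ((i : Nat) : Int) 0 - s] else []) = pvLocAt samples s e := by
    funext i; simp [pvLocAt]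
  rw [PySem.List.len_eq, hfun, pv_foldl_pair, pv_recB_eq, PySem.List.pyRange_zero_natCast,
      List.flatMap_map, List.flatMap_map, List.range_eq_range']
  simp only [hsym, hloc, List.nil_append, Nat.sub_zero]
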